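-- pv_equiv track=rewrite | github.com/leiYan1225/MyProject_siat | Python/data_structure/Findjob/Meituan.py | strDis
-- ===== SOURCE A (Python) =====
-- def strDis(a,b):
--     a_len = len(a)
--     b_len = len(b)
--     num = 0
--     for i in range(a_len-b_len+1): # 遍历a中每个与b长度相等的子串
--         c = a[i:i + b_len]      # 存入c中
--         for j in range(b_len):   # 遍历b
--             if c[j] != b[j]:    # 判断列表中有元素不等则num加一
--                 num += 1
--     return num
-- ===== SOURCE B (Python) =====
-- def strDis(a, b):
--     # Column-wise: for each position j of b, count matches of b[j] in the
--     # window-aligned slice a[j:j+w] with str.count, then mismatches = w*len(b) - matches.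
--     w = len(a) - len(b) + 1
--     if w <= 0:
--         return 0
--     matches = 0
--     for j, ch in enumerate(b):
--         matches += a.count(ch, j, j + w)
--     return w * len(b) - matches
-- ===== Notes on version B (the rewrite author's own statement) =====
-- stated objective: alternative
-- what changed: Replaced the per-window nested character loops by a column-wise count: for each position j of b, matches of b[j] in a[j:j+w] are counted with str.count, and the result is w*len(b) - matches.
import Mathlib
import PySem

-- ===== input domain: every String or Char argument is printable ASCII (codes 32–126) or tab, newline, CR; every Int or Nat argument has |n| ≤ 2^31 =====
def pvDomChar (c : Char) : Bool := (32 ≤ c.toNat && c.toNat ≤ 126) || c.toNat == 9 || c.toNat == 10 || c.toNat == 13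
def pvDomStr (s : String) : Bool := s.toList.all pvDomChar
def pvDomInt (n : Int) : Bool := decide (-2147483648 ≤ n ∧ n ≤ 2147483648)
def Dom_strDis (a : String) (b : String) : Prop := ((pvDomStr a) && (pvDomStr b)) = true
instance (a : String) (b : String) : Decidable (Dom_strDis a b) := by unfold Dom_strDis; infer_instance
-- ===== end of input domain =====

-- B replaces A's per-window nested mismatch loops by a column-wise count (matches of b[j] in
-- a[j:j+w] via str.count, result = w*len(b) - matches): a different traversal, same asymptotic cost.


-- ===== PORT A =====
-- literal port of A's nested loops; c[j] and b[j] are always in range here, so pyGetD is exact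
def strDis (a : String) (b : String) : Int :=
  let aL := a.toList
  let bL := b.toList
  let aLen : Int := aL.length
  let bLen : Int := bL.length
  (PySem.List.pyRange 0 (aLen - bLen + 1) 1).foldl (fun num i =>
    let c := PySem.List.slice aL (some i) (some (i + bLen))
    (PySem.List.pyRange 0 bLen 1).foldl (fun num j =>
      if PySem.List.pyGetD c j ' ' ≠ PySem.List.pyGetD bL j ' ' then num + 1 else num) num) 0

-- ===== PORT B =====
-- port of Source B; a.count(ch, j, j+w) for a single char ch is exactly the char count of the slice a[j:j+w]
def strDis_alt (a : String) (b : String) : Int :=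
  let aL := a.toList
  let bL := b.toList
  let w : Int := (aL.length : Int) - (bL.length : Int) + 1
  if w ≤ 0 then 0
  else
    let mtc : Int := (PySem.List.enumerate bL 0).foldl
      (fun acc p => acc + ((PySem.List.slice aL (some p.1) (some (p.1 + w))).count p.2 : Int)) 0
    w * (bL.length : Int) - mtc

-- ===== PRECONDITION & SPEC =====
def Spec_strDis (a : String) (b : String) (out : Int) : Prop := out = strDis_alt a b
instance (a : String) (b : String) (out : Int) : Decidable (Spec_strDis a b out) := by unfold Spec_strDis; infer_instance

-- ===== CLAIM (what is proved, stated in full; the proofs are below) =====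
def Claim_equal_strDis : Prop := ∀ (a : String) (b : String), Dom_strDis a b → Spec_strDis a b (strDis a b)

-- ===== LEMMAS AND PROOFS =====

theorem sum_map_range (f : Nat → Int) (k : Nat) :
    ((List.range k).map f).sum = ∑ j ∈ Finset.range k, f j := by
  induction k with
  | zero => simp
  | succ k ih => rw [List.range_succ, List.map_append, List.sum_append, Finset.sum_range_succ, ih]; simp

theorem countP_range_sum (p : Nat → Bool) (k : Nat) :
    ((List.range k).countP p : Int) = ∑ j ∈ Finset.range k, (if p j then (1:Int) else 0) := by
  induction k with
  | zero => simp
  | succ k ih =>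
      rw [Finset.sum_range_succ, List.range_succ, List.countP_append, ← ih]
      simp [List.countP_cons]

theorem count_eq_sum_getD (l : List Char) (ch : Char) :
    (l.count ch : Int) = ∑ i ∈ Finset.range l.length, (if l.getD i ' ' = ch then (1:Int) else 0) := by
  induction l using List.reverseRecOn with
  | nil => simp
  | append_singleton xs x ih =>
      rw [List.count_append, List.length_append]
      simp only [List.length_singleton]
      rw [Finset.sum_range_succ]
      have h1 : ∀ i ∈ Finset.range xs.length,
          (if (xs ++ [x]).getD i ' ' = ch then (1:Int) else 0) = (if xs.getD i ' ' = ch then (1:Int) else 0) := by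
        intro i hi
        rw [Finset.mem_range] at hi
        rw [List.getD_append _ _ _ _ hi]
      rw [Finset.sum_congr rfl h1, ← ih]
      have h2 : (xs ++ [x]).getD xs.length ' ' = x := by
        simp [List.getD_eq_getElem?_getD]
      rw [h2]
      simp [List.count_singleton]

-- A's inner loop over one window, as an indicator sum
theorem strDis_inner (la lb : List Char) (k : Nat) (num : Int) :
    (PySem.List.pyRange 0 (lb.length:Int) 1).foldl (fun num j =>
      if PySem.List.pyGetD (PySem.List.slice la (some (k:Int)) (some ((k:Int) + (lb.length:Int)))) j ' '
          ≠ PySem.List.pyGetD lb j ' ' then num + 1 else num) num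
    = num + ∑ j ∈ Finset.range lb.length,
        (if ¬ (la.getD (k + j) ' ' = lb.getD j ' ') then (1:Int) else 0) := by
  rw [PySem.List.pyRange_one, List.foldl_map, PySem.List.slice_natCast_add]
  rw [PySem.List.foldl_ite_add_one
    (fun j : Nat => PySem.List.pyGetD ((la.drop k).take lb.length) ((0:Int) + (j:Int)) ' '
        ≠ PySem.List.pyGetD lb ((0:Int) + (j:Int)) ' ')
    (List.range ((lb.length:Int) - 0).toNat) num]
  congr 1
  rw [countP_range_sum]
  have hlen : ((lb.length:Int) - 0).toNat = lb.length := by omega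
  rw [hlen]
  apply Finset.sum_congr rfl
  intro j hj
  rw [Finset.mem_range] at hj
  have hget : PySem.List.pyGetD ((la.drop k).take lb.length) ((0:Int) + (j:Int)) ' ' = la.getD (k + j) ' ' := by
    simp only [zero_add, PySem.List.pyGetD_natCast]
    rw [List.getD_eq_getElem?_getD, List.getD_eq_getElem?_getD, List.getElem?_take_of_lt hj, List.getElem?_drop]
  have hget2 : PySem.List.pyGetD lb ((0:Int) + (j:Int)) ' ' = lb.getD j ' ' := by
    simp
  rw [hget, hget2]
  simp

-- A as a double indicator sum (case m ≤ n)
theorem strDis_eq_sum (a b : String) (h : b.toList.length ≤ a.toList.length) :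
    strDis a b = ∑ i ∈ Finset.range (a.toList.length - b.toList.length + 1),
      ∑ j ∈ Finset.range b.toList.length,
        (if ¬ (a.toList.getD (i + j) ' ' = b.toList.getD j ' ') then (1:Int) else 0) := by
  simp only [strDis]
  rw [PySem.List.pyRange_one 0 ((a.toList.length:Int) - (b.toList.length:Int) + 1), List.foldl_map]
  have htn : (((a.toList.length:Int) - (b.toList.length:Int) + 1) - 0).toNat
      = a.toList.length - b.toList.length + 1 := by omega
  rw [htn]
  rw [PySem.List.foldl_congr_mem _ _
    (fun (num : Int) (k : Nat) => num + ∑ j ∈ Finset.range b.toList.length,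
        (if ¬ (a.toList.getD (k + j) ' ' = b.toList.getD j ' ') then (1:Int) else 0)) 0
    (by
      intro acc k _
      simp only [zero_add]
      exact strDis_inner a.toList b.toList k acc)]
  rw [PySem.List.foldl_add, sum_map_range]
  simp

theorem enum_fold (la : List Char) (w : Int) (lb : List Char) : ∀ (s : Nat) (acc : Int),
    (PySem.List.enumerate lb (s:Int)).foldl
      (fun acc p => acc + ((PySem.List.slice la (some p.1) (some (p.1 + w))).count p.2 : Int)) acc
    = acc + ∑ j ∈ Finset.range lb.length,
        ((PySem.List.slice la (some ((s+j : Nat):Int)) (some (((s+j : Nat):Int) + w))).count (lb.getD j ' ') : Int) := by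
  induction lb with
  | nil => intro s acc; simp [PySem.List.enumerate]
  | cons x xs ih =>
      intro s acc
      rw [PySem.List.enumerate_cons, List.foldl_cons]
      have hs : (s:Int) + 1 = ((s+1 : Nat):Int) := by push_cast; ring
      rw [hs, ih (s+1)]
      rw [List.length_cons, Finset.sum_range_succ']
      simp only [List.getD_cons_zero, List.getD_cons_succ, Nat.add_zero]
      have : ∀ j : Nat, (s + 1 + j) = (s + (j+1)) := by omega
      simp only [this]
      ring

-- B as the complementary double indicator sum (case m ≤ n)
theorem strDis_alt_eq_sum (a b : String) (h : b.toList.length ≤ a.toList.length) :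
    strDis_alt a b = ((a.toList.length - b.toList.length + 1 : Nat) : Int) * (b.toList.length : Int)
      - ∑ j ∈ Finset.range b.toList.length,
          ∑ i ∈ Finset.range (a.toList.length - b.toList.length + 1),
            (if a.toList.getD (j + i) ' ' = b.toList.getD j ' ' then (1:Int) else 0) := by
  simp only [strDis_alt]
  rw [if_neg (show ¬((a.toList.length:Int) - (b.toList.length:Int) + 1 ≤ 0) by omega)]
  have hf := enum_fold a.toList ((a.toList.length:Int) - (b.toList.length:Int) + 1) b.toList 0 0
  simp only [Nat.cast_zero, zero_add] at hf
  rw [hf]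
  have hw : ((a.toList.length:Int) - (b.toList.length:Int) + 1)
      = ((a.toList.length - b.toList.length + 1 : Nat) : Int) := by omega
  rw [hw]
  congr 1
  apply Finset.sum_congr rfl
  intro j hj
  rw [Finset.mem_range] at hj
  rw [PySem.List.slice_natCast_add, count_eq_sum_getD]
  have hlen : ((a.toList.drop j).take (a.toList.length - b.toList.length + 1)).length
      = a.toList.length - b.toList.length + 1 := by
    rw [List.length_take, List.length_drop]
    omega
  rw [hlen]
  apply Finset.sum_congr rfl
  intro i hi
  rw [Finset.mem_range] at hi
  have hget : ((a.toList.drop j).take (a.toList.length - b.toList.length + 1)).getD i ' '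
      = a.toList.getD (j + i) ' ' := by
    rw [List.getD_eq_getElem?_getD, List.getD_eq_getElem?_getD, List.getElem?_take_of_lt hi, List.getElem?_drop]
  rw [hget]

-- ===== VERDICT (by name: the statement is the Claim_ definition above) =====
theorem strDis_spec : Claim_equal_strDis := by
  intro a b _
  unfold Spec_strDis
  by_cases h : b.toList.length ≤ a.toList.length
  · rw [strDis_eq_sum a b h, strDis_alt_eq_sum a b h, Finset.sum_comm]
    have key : ∀ j ∈ Finset.range b.toList.length,
        (∑ i ∈ Finset.range (a.toList.length - b.toList.length + 1),
          (if ¬ (a.toList.getD (i + j) ' ' = b.toList.getD j ' ') then (1:Int) else 0))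
        = ((a.toList.length - b.toList.length + 1 : Nat) : Int)
          - ∑ i ∈ Finset.range (a.toList.length - b.toList.length + 1),
              (if a.toList.getD (j + i) ' ' = b.toList.getD j ' ' then (1:Int) else 0) := by
      intro j _
      have hpt : ∀ i : Nat, (if ¬ (a.toList.getD (i + j) ' ' = b.toList.getD j ' ') then (1:Int) else 0)
          = 1 - (if a.toList.getD (j + i) ' ' = b.toList.getD j ' ' then (1:Int) else 0) := by
        intro i
        rw [add_comm j i]
        split_ifs <;> omega

      simp only [hpt]
      rw [Finset.sum_sub_distrib, Finset.sum_const, Finset.card_range]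
      simp
    rw [Finset.sum_congr rfl key, Finset.sum_sub_distrib, Finset.sum_const, Finset.card_range]
    push_cast
    ring
  · have hA : strDis a b = 0 := by
      simp only [strDis]
      rw [PySem.List.pyRange_one_eq_nil
        (show ((a.toList.length : Int) - (b.toList.length : Int) + 1) ≤ 0 by omega)]
      rfl
    have hB : strDis_alt a b = 0 := by
      simp only [strDis_alt]
      rw [if_pos (by omega)]
    rw [hA, hB]
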